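-- pv_equiv track=rewrite | github.com/mbronis/algos | coderbyte.py | VowelSquare
-- ===== SOURCE A (Python) =====
-- from collections import defaultdict
--
-- def VowelSquare(strArr):
--
--     vovels = ['a','e','i','o','u']
--
--     row_candidates = defaultdict(set)
--
--     for r, row in enumerate(strArr):
--         for c, col in enumerate(row[:-1]):
--             if col in vovels and row[c+1] in vovels:
--                 row_candidates[r].add(c)
--
--     for r, candidates in row_candidates.items():
--         common_candidate=candidates.intersection(row_candidates.get(r+1, {}))
--         if len(common_candidate) > 0:
--             return str(r) + '-' + str(min(common_candidate))
--
--     return 'not found'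
-- ===== SOURCE B (Python) =====
-- def VowelSquare(strArr):
--     vowels = set('aeiou')
--     for r, (top, bot) in enumerate(zip(strArr, strArr[1:])):
--         for c in range(min(len(top), len(bot)) - 1):
--             if top[c] in vowels and top[c + 1] in vowels and bot[c] in vowels and bot[c + 1] in vowels:
--                 return str(r) + '-' + str(c)
--     return 'not found'
-- ===== Notes on version B (the rewrite author's own statement) =====
-- stated objective: simpler
-- what changed: Replaced A's defaultdict-of-candidate-sets build plus a second pass intersecting each row's set with the next row's by a single direct row-major scan over adjacent row pairs that tests the four cells of each 2x2 square and returns at the first hit.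
import Mathlib
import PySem

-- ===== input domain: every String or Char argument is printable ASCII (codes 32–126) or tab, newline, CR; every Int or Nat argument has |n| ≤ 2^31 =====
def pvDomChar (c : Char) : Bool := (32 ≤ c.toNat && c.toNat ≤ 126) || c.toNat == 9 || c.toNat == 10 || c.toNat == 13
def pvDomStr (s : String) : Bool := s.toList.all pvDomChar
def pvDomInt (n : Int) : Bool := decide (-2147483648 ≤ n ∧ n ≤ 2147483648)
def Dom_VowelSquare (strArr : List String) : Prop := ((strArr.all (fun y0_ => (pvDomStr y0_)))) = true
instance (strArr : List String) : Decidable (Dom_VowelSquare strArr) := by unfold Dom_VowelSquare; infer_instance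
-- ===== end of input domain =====

-- B replaces A's defaultdict-of-candidate-sets + intersection scan by a direct row-major scan of
-- adjacent row pairs (objective: simpler); return values agree on all inputs.

-- ===== PORT A =====
-- second loop of A: 'for r, candidates in row_candidates.items(): …' with early return
def vsScanA (d : PySem.Dict Int (PySem.Set Int)) : List (Int × PySem.Set Int) → String
  | [] => "not found"
  | (r, cand) :: rest =>
    let common := PySem.Set.inter cand (d.getD (r + 1) PySem.Set.empty)
    if 0 < common.length then
      PySem.Int.toStr r ++ "-" ++ PySem.Int.toStr ((PySem.List.min? common (fun x => x)).getD 0)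
    else vsScanA d rest

def VowelSquare (strArr : List String) : String :=
  let vovels : List Char := ['a', 'e', 'i', 'o', 'u']
  let row_candidates : PySem.Dict Int (PySem.Set Int) :=
    (PySem.List.enumerate strArr 0).foldl (fun d rw =>
      (PySem.List.enumerate (PySem.List.slice rw.2.toList none (some (-1))) 0).foldl (fun d cc =>
        if vovels.contains cc.2 && vovels.contains (PySem.List.pyGetD rw.2.toList (cc.1 + 1) ' ') then
          d.modify rw.1 PySem.Set.empty (fun s => PySem.Set.add s cc.1)
        else d) d)
      PySem.Dict.empty
  vsScanA row_candidates row_candidates.items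

-- ===== PORT B =====
def vsPairOk (vowels : PySem.Set Char) (top bot : List Char) (c : Nat) : Bool :=
  vowels.contains (top.getD c ' ') && vowels.contains (top.getD (c + 1) ' ') &&
    vowels.contains (bot.getD c ' ') && vowels.contains (bot.getD (c + 1) ' ')

def vsGoB (vowels : PySem.Set Char) (r : Int) : List (String × String) → String
  | [] => "not found"
  | (top, bot) :: rest =>
    match (List.range (min top.toList.length bot.toList.length - 1)).find?
        (fun c => vsPairOk vowels top.toList bot.toList c) with
    | some c => PySem.Int.toStr r ++ "-" ++ PySem.Int.toStr (c : Int)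
    | none => vsGoB vowels (r + 1) rest

def VowelSquare_alt (strArr : List String) : String :=
  vsGoB (PySem.Set.ofList "aeiou".toList) 0 (strArr.zip (PySem.List.slice strArr (some 1) none))

-- ===== PRECONDITION & SPEC =====
def Spec_VowelSquare (strArr : List String) (out : String) : Prop := out = VowelSquare_alt strArr
instance (strArr : List String) (out : String) : Decidable (Spec_VowelSquare strArr out) := by unfold Spec_VowelSquare; infer_instance

-- ===== CLAIM (what is proved, stated in full; the proofs are below) =====
def Claim_equal_VowelSquare : Prop := ∀ (strArr : List String), Dom_VowelSquare strArr → Spec_VowelSquare strArr (VowelSquare strArr)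

-- ===== LEMMAS AND PROOFS =====

-- 'c is a vowel' in both ports
def vsVW (c : Char) : Bool := (['a', 'e', 'i', 'o', 'u'] : List Char).contains c

-- the inner-loop condition of A on row cs
def vsQ (cs : List Char) (cc : Int × Char) : Bool :=
  vsVW cc.2 && vsVW (PySem.List.pyGetD cs (cc.1 + 1) ' ')

-- the candidate columns of a row, in increasing order (what A's set for that row holds)
def vsCand (cs : List Char) : List Int :=
  ((PySem.List.enumerate cs.dropLast 0).filter (vsQ cs)).map (·.1)

def vsCandS (s : String) : List Int := vsCand s.toList

-- the keys of A's dict after the build loop, starting at row index s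
def vsKeysFrom (rows : List String) (s : Int) : List Int :=
  match rows with
  | [] => []
  | row :: rest => (if vsCandS row = [] then [] else [s]) ++ vsKeysFrom rest (s + 1)

-- A's build loop (exactly the fold in VowelSquare), made generic in start index and dict
def vsBuild (rows : List String) (s : Int) (d : PySem.Dict Int (PySem.Set Int)) :
    PySem.Dict Int (PySem.Set Int) :=
  (PySem.List.enumerate rows s).foldl (fun d rw =>
    (PySem.List.enumerate (PySem.List.slice rw.2.toList none (some (-1))) 0).foldl (fun d cc =>
      if (['a', 'e', 'i', 'o', 'u'] : List Char).contains cc.2 &&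
          (['a', 'e', 'i', 'o', 'u'] : List Char).contains (PySem.List.pyGetD rw.2.toList (cc.1 + 1) ' ') then
        d.modify rw.1 PySem.Set.empty (fun s => PySem.Set.add s cc.1)
      else d) d) d

-- the common candidates of rows i and i+1 (A's intersection at row i)
def vsCommonAt (rows : List String) (i : Nat) : List Int :=
  PySem.Set.inter (vsCandS (rows.getD i "")) (vsCandS (rows.getD (i + 1) ""))

-- B's inner search at row i
def vsGP (rows : List String) (i : Nat) : Option Nat :=
  (List.range (min (rows.getD i "").toList.length (rows.getD (i + 1) "").toList.length - 1)).find?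
    (fun c => vsPairOk (PySem.Set.ofList "aeiou".toList) (rows.getD i "").toList (rows.getD (i + 1) "").toList c)

theorem vsInner_getD (q : Int × Char → Bool) (r : Int) (l : List (Int × Char)) :
    ∀ (d : PySem.Dict Int (PySem.Set Int)) (k : Int),
    ((l.foldl (fun d cc => if q cc then d.modify r PySem.Set.empty (fun s => PySem.Set.add s cc.1) else d) d).getD k PySem.Set.empty)
      = if k = r then PySem.Set.update (d.getD r PySem.Set.empty) ((l.filter q).map (·.1))
        else d.getD k PySem.Set.empty := by
  induction l with
  | nil =>
    intro d k
    simp only [List.foldl_nil, List.filter_nil, List.map_nil, PySem.Set.update_nil]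
    split <;> simp_all
  | cons x l ih =>
    intro d k
    simp only [List.foldl_cons, List.filter_cons]
    by_cases hq : q x = true
    · simp only [hq, if_true, List.map_cons]
      rw [ih]
      by_cases hk : k = r
      · subst hk
        rw [if_pos rfl, if_pos rfl, PySem.Dict.getD_modify, if_pos rfl, PySem.Set.update_cons]
      · rw [if_neg hk, if_neg hk, PySem.Dict.getD_modify, if_neg hk]
    · simp only [hq, Bool.false_eq_true, if_false]
      rw [ih]

theorem vsInner_keys (q : Int × Char → Bool) (r : Int) (l : List (Int × Char)) :
    ∀ (d : PySem.Dict Int (PySem.Set Int)),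
    ((l.foldl (fun d cc => if q cc then d.modify r PySem.Set.empty (fun s => PySem.Set.add s cc.1) else d) d).keys)
      = if l.filter q = [] then d.keys else PySem.Set.add d.keys r := by
  induction l with
  | nil => intro d; simp
  | cons x l ih =>
    intro d
    simp only [List.foldl_cons, List.filter_cons]
    by_cases hq : q x = true
    · simp only [hq, if_true]
      rw [ih]
      have hkm : (d.modify r PySem.Set.empty (fun s => PySem.Set.add s x.1)).keys
          = PySem.Set.add d.keys r := by
        rw [PySem.Dict.keys_modify]
        by_cases hc : d.contains r = true
        · rw [PySem.Dict.keys_insert_of_contains _ _ hc,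
            PySem.Set.add_of_mem ((PySem.Dict.contains_iff_mem_keys _ _).1 hc)]
        · rw [PySem.Dict.keys_insert_of_not_contains _ _ (by simpa using hc),
            PySem.Set.add_of_not_mem (fun hm => hc ((PySem.Dict.contains_iff_mem_keys _ _).2 hm))]
      rw [hkm]
      by_cases hfl : l.filter q = []
      · simp [hfl]
      · rw [if_neg hfl, if_neg (by simp),
          PySem.Set.add_of_mem ((PySem.Set.mem_add _ _ _).2 (Or.inr rfl))]
    · simp only [hq, Bool.false_eq_true, if_false]
      rw [ih]

theorem vsCand_pairwise (cs : List Char) : (vsCand cs).Pairwise (· < ·) := by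
  unfold vsCand
  exact List.pairwise_map.2 ((PySem.List.pairwise_lt_enumerate _ 0).filter _)

theorem vsCand_nodup (cs : List Char) : (vsCand cs).Nodup :=
  (vsCand_pairwise cs).imp ne_of_lt

theorem mem_vsCand (cs : List Char) (x : Int) :
    x ∈ vsCand cs ↔ ∃ k : Nat, k + 1 < cs.length ∧ x = (k : Int) ∧
      (vsVW (cs.getD k ' ') && vsVW (cs.getD (k + 1) ' ')) = true := by
  unfold vsCand vsQ
  simp only [List.mem_map, List.mem_filter, PySem.List.mem_enumerate_iff]
  constructor
  · rintro ⟨cc, ⟨⟨k, hk, rfl⟩, hq⟩, rfl⟩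
    have hlen : k + 1 < cs.length := by
      have := cs.length_dropLast; omega
    refine ⟨k, hlen, by simp, ?_⟩
    have h1 : cs.dropLast[k] = cs.getD k ' ' := by
      rw [List.getElem_dropLast, List.getD_eq_getElem cs ' ' (by omega)]
    have h2 : PySem.List.pyGetD cs ((k : Int) + 1) ' ' = cs.getD (k + 1) ' ' := by
      have hc : (k : Int) + 1 = ((k + 1 : Nat) : Int) := by push_cast; ring
      rw [hc, PySem.List.pyGetD_natCast]
    simpa [h1, h2] using hq
  · rintro ⟨k, hlen, rfl, hvw⟩
    have hk : k < cs.dropLast.length := by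
      have := cs.length_dropLast; omega
    refine ⟨((0 : Int) + (k : Int), cs.dropLast[k]), ⟨⟨k, hk, rfl⟩, ?_⟩, by simp⟩
    have h1 : cs.dropLast[k] = cs.getD k ' ' := by
      rw [List.getElem_dropLast, List.getD_eq_getElem cs ' ' (by omega)]
    have h2 : PySem.List.pyGetD cs ((k : Int) + 1) ' ' = cs.getD (k + 1) ' ' := by
      have hc : (k : Int) + 1 = ((k + 1 : Nat) : Int) := by push_cast; ring
      rw [hc, PySem.List.pyGetD_natCast]
    simpa [h1, h2] using hvw

-- the inner fold exactly as it appears in the ported build loop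
theorem vsInnerL_getD (cs : List Char) (r : Int) (d : PySem.Dict Int (PySem.Set Int)) (k : Int) :
    ((PySem.List.enumerate cs.dropLast 0).foldl (fun d cc =>
        if (['a', 'e', 'i', 'o', 'u'] : List Char).contains cc.2 &&
            (['a', 'e', 'i', 'o', 'u'] : List Char).contains (PySem.List.pyGetD cs (cc.1 + 1) ' ') then
          d.modify r PySem.Set.empty (fun s => PySem.Set.add s cc.1)
        else d) d).getD k PySem.Set.empty
      = if k = r then PySem.Set.update (d.getD r PySem.Set.empty) (vsCand cs)
        else d.getD k PySem.Set.empty :=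
  vsInner_getD (vsQ cs) r _ d k

theorem vsInnerL_keys (cs : List Char) (r : Int) (d : PySem.Dict Int (PySem.Set Int)) :
    ((PySem.List.enumerate cs.dropLast 0).foldl (fun d cc =>
        if (['a', 'e', 'i', 'o', 'u'] : List Char).contains cc.2 &&
            (['a', 'e', 'i', 'o', 'u'] : List Char).contains (PySem.List.pyGetD cs (cc.1 + 1) ' ') then
          d.modify r PySem.Set.empty (fun s => PySem.Set.add s cc.1)
        else d) d).keys
      = if vsCand cs = [] then d.keys else PySem.Set.add d.keys r := by
  refine Eq.trans (vsInner_keys (vsQ cs) r (PySem.List.enumerate cs.dropLast 0) d) ?_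
  by_cases hf : (PySem.List.enumerate cs.dropLast 0).filter (vsQ cs) = []
  · rw [if_pos hf, if_pos (by simp [vsCand, hf])]
  · rw [if_neg hf, if_neg (by simp [vsCand, hf])]

theorem vsBuild_spec (rows : List String) :
    ∀ (s : Int) (d : PySem.Dict Int (PySem.Set Int)), (∀ k ∈ d.keys, k < s) →
    ((vsBuild rows s d).keys = d.keys ++ vsKeysFrom rows s)
    ∧ (∀ k : Int, k < s → (vsBuild rows s d).getD k PySem.Set.empty = d.getD k PySem.Set.empty)
    ∧ (∀ i : Nat, (vsBuild rows s d).getD (s + (i : Int)) PySem.Set.empty = vsCandS (rows.getD i "")) := by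
  induction rows with
  | nil =>
    intro s d hd
    refine ⟨by simp [vsBuild, vsKeysFrom, PySem.List.enumerate_nil], ?_, ?_⟩
    · intro k _; simp [vsBuild, PySem.List.enumerate_nil]
    · intro i
      simp only [vsBuild, PySem.List.enumerate_nil, List.foldl_nil]
      have hc : d.contains (s + (i : Int)) = false := by
        by_contra h
        have hmem := (PySem.Dict.contains_iff_mem_keys d (s + (i : Int))).1 (by simpa using h)
        have := hd _ hmem; omega
      rw [PySem.Dict.getD_of_not_contains _ _ hc]
      simp [vsCandS, vsCand, PySem.List.enumerate_nil, PySem.Set.empty]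
  | cons row rest ih =>
    intro s d hd
    have hnc : d.contains s = false := by
      by_contra h
      have hmem := (PySem.Dict.contains_iff_mem_keys d s).1 (by simpa using h)
      have := hd _ hmem; omega
    have hnm : s ∉ d.keys := fun hm => by
      simpa [hnc] using (PySem.Dict.contains_iff_mem_keys d s).2 hm
    set d' := (PySem.List.enumerate (PySem.List.slice row.toList none (some (-1))) 0).foldl
      (fun d cc =>
        if (['a', 'e', 'i', 'o', 'u'] : List Char).contains cc.2 &&
            (['a', 'e', 'i', 'o', 'u'] : List Char).contains (PySem.List.pyGetD row.toList (cc.1 + 1) ' ') then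
          d.modify s PySem.Set.empty (fun s => PySem.Set.add s cc.1)
        else d) d with hd'def
    have hbuild : vsBuild (row :: rest) s d = vsBuild rest (s + 1) d' := by
      rw [hd'def]
      rfl
    have hgetd' : ∀ k : Int, d'.getD k PySem.Set.empty
        = if k = s then PySem.Set.update (d.getD s PySem.Set.empty) (vsCand row.toList)
          else d.getD k PySem.Set.empty := by
      intro k
      rw [hd'def, PySem.List.slice_to_neg_one]
      exact vsInnerL_getD row.toList s d k
    have hkeys' : d'.keys = d.keys ++ (if vsCandS row = [] then [] else [s]) := by
      rw [hd'def, PySem.List.slice_to_neg_one, vsInnerL_keys row.toList s d]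
      by_cases hc : vsCandS row = []
      · rw [if_pos (show vsCand row.toList = [] from hc), if_pos hc, List.append_nil]
      · rw [if_neg (show ¬ vsCand row.toList = [] from hc), if_neg hc,
          PySem.Set.add_of_not_mem hnm]
    have hds : d.getD s PySem.Set.empty = PySem.Set.empty :=
      PySem.Dict.getD_of_not_contains _ _ hnc
    have hcand : d'.getD s PySem.Set.empty = vsCandS row := by
      rw [hgetd' s, if_pos rfl, hds]
      show PySem.Set.update [] (vsCand row.toList) = vsCandS row
      rw [PySem.Set.update_nil_left, PySem.Set.ofList_eq_self_of_nodup _ (vsCand_nodup _)]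
      rfl
    have hd'bound : ∀ k ∈ d'.keys, k < s + 1 := by
      intro k hk
      rw [hkeys'] at hk
      rcases List.mem_append.1 hk with h | h
      · have := hd _ h; omega
      · rcases (by split at h <;> simp_all : k = s) with rfl; omega
    obtain ⟨ihk, ihlow, ihhigh⟩ := ih (s + 1) d' hd'bound
    refine ⟨?_, ?_, ?_⟩
    · rw [hbuild, ihk, hkeys', List.append_assoc]
      rfl
    · intro k hk
      rw [hbuild, ihlow k (by omega), hgetd' k, if_neg (by omega)]
    · intro i
      rw [hbuild]
      cases i with
      | zero =>
        have h0 : s + ((0 : Nat) : Int) = s := by simp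
        rw [h0, ihlow s (by omega), hcand]
        rfl
      | succ j =>
        have h1 : s + ((j + 1 : Nat) : Int) = (s + 1) + (j : Int) := by push_cast; ring
        rw [h1, ihhigh j]
        rfl

theorem vsKeysFrom_eq (rows : List String) :
    ∀ s : Int, vsKeysFrom rows s
      = ((List.range rows.length).filter (fun i => !(vsCandS (rows.getD i "")).isEmpty)).map
          (fun i : Nat => s + (i : Int)) := by
  induction rows with
  | nil => intro s; simp [vsKeysFrom]
  | cons row rest ih =>
    intro s
    have hcomp : ((fun i => !(vsCandS ((row :: rest).getD i "")).isEmpty) ∘ Nat.succ)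
        = fun i => !(vsCandS (rest.getD i "")).isEmpty := rfl
    have hmapc : ∀ L : List Nat, L.map ((fun i : Nat => s + (i : Int)) ∘ Nat.succ)
        = L.map (fun i : Nat => (s + 1) + (i : Int)) :=
      fun L => List.map_congr_left (fun i _ => by
        show s + ((i + 1 : Nat) : Int) = (s + 1) + (i : Int)
        push_cast; ring)
    simp only [vsKeysFrom, List.length_cons, List.range_succ_eq_map, List.filter_cons,
      List.getD_cons_zero, List.filter_map, hcomp, ih (s + 1)]
    by_cases hc : vsCandS row = []
    · simp only [hc]
      simp
      intro a _ _
      ring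
    · have hne : (!(vsCandS row).isEmpty) = true := by
        cases hcs : vsCandS row with
        | nil => exact absurd hcs hc
        | cons a t => simp
      simp [hne, hc]
      intro a _ _
      ring

theorem vsScanA_spec (rows : List String) (ks : List Nat) :
    vsScanA (vsBuild rows 0 PySem.Dict.empty)
        (ks.map (fun i : Nat => ((i : Int), vsCandS (rows.getD i ""))))
      = match ks.find? (fun i => !(vsCommonAt rows i).isEmpty) with
        | some i => PySem.Int.toStr (i : Int) ++ "-" ++
            PySem.Int.toStr ((PySem.List.min? (vsCommonAt rows i) (fun x => x)).getD 0)
        | none => "not found" := by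
  induction ks with
  | nil => simp [vsScanA]
  | cons i ks ih =>
    have hbuild := vsBuild_spec rows 0 PySem.Dict.empty (by simp [PySem.Dict.keys_empty])
    have hnext : (vsBuild rows 0 PySem.Dict.empty).getD ((i : Int) + 1) PySem.Set.empty
        = vsCandS (rows.getD (i + 1) "") := by
      have h := hbuild.2.2 (i + 1)
      have hc : (0 : Int) + ((i + 1 : Nat) : Int) = (i : Int) + 1 := by push_cast; ring
      rwa [hc] at h
    simp only [List.map_cons, vsScanA, hnext, List.find?_cons]
    have hcommon : PySem.Set.inter (vsCandS (rows.getD i "")) (vsCandS (rows.getD (i + 1) ""))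
        = vsCommonAt rows i := rfl
    rw [hcommon]
    by_cases hg : (!(vsCommonAt rows i).isEmpty) = true
    · have hlen : 0 < (vsCommonAt rows i).length := by
        cases h : vsCommonAt rows i with
        | nil => simp [h] at hg
        | cons a t => simp
      rw [if_pos hlen, hg]
    · have hlen : ¬ 0 < (vsCommonAt rows i).length := by
        cases h : vsCommonAt rows i with
        | nil => simp
        | cons a t => simp [h] at hg
      rw [if_neg hlen]
      simp only [Bool.not_eq_true] at hg
      rw [hg]
      exact ih

theorem vsCommonAt_eq (rows : List String) (i : Nat) :
    vsCommonAt rows i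
      = ((List.range (min (rows.getD i "").toList.length (rows.getD (i + 1) "").toList.length - 1)).filter
          (fun c => vsPairOk (PySem.Set.ofList "aeiou".toList) (rows.getD i "").toList (rows.getD (i + 1) "").toList c)).map
          (fun c : Nat => (c : Int)) := by
  have hco : ∀ ch : Char, (PySem.Set.ofList "aeiou".toList).contains ch = vsVW ch := fun _ => rfl
  set t := (rows.getD i "").toList with ht
  set b := (rows.getD (i + 1) "").toList with hb
  have hlp : (vsCommonAt rows i).Pairwise (· < ·) := (vsCand_pairwise t).filter _
  have hrp : (((List.range (min t.length b.length - 1)).filter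
      (fun c => vsPairOk (PySem.Set.ofList "aeiou".toList) t b c)).map (fun c : Nat => (c : Int))).Pairwise (· < ·) := by
    refine List.pairwise_map.2 ((List.pairwise_lt_range.filter _).imp ?_)
    intro a b h; exact_mod_cast h
  have hmem : ∀ x : Int, x ∈ vsCommonAt rows i ↔
      x ∈ ((List.range (min t.length b.length - 1)).filter
        (fun c => vsPairOk (PySem.Set.ofList "aeiou".toList) t b c)).map (fun c : Nat => (c : Int)) := by
    intro x
    rw [show vsCommonAt rows i = PySem.Set.inter (vsCand t) (vsCand b) from rfl]
    rw [PySem.Set.mem_inter, mem_vsCand, mem_vsCand]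
    simp only [List.mem_map, List.mem_filter, List.mem_range, vsPairOk, hco]
    constructor
    · rintro ⟨⟨k, hk, rfl, hvt⟩, ⟨k', hk', hkk', hvb⟩⟩
      have : k' = k := by exact_mod_cast hkk'.symm
      subst this
      refine ⟨k', ⟨by omega, ?_⟩, rfl⟩
      simp only [Bool.and_eq_true] at hvt hvb ⊢
      exact ⟨⟨⟨hvt.1, hvt.2⟩, hvb.1⟩, hvb.2⟩
    · rintro ⟨c, ⟨hc, hv⟩, rfl⟩
      simp only [Bool.and_eq_true] at hv
      exact ⟨⟨c, by omega, rfl, by rw [Bool.and_eq_true]; exact ⟨hv.1.1.1, hv.1.1.2⟩⟩,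
        ⟨c, by omega, rfl, by rw [Bool.and_eq_true]; exact ⟨hv.1.2, hv.2⟩⟩⟩
  have hperm := (List.perm_ext_iff_of_nodup (hlp.imp ne_of_lt) (hrp.imp ne_of_lt)).2 hmem
  exact PySem.List.eq_of_perm_of_pairwise_le_of_injective (fun x => x) Function.injective_id
    hperm (hlp.imp le_of_lt) (hrp.imp le_of_lt)

theorem vsCommonAt_pairwise (rows : List String) (i : Nat) :
    (vsCommonAt rows i).Pairwise (· < ·) :=
  (vsCand_pairwise _).filter _

theorem vsA_eq (rows : List String) :
    VowelSquare rows
      = match (List.range rows.length).find? (fun i => !(vsCommonAt rows i).isEmpty) with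
        | some i => PySem.Int.toStr (i : Int) ++ "-" ++
            PySem.Int.toStr ((PySem.List.min? (vsCommonAt rows i) (fun x => x)).getD 0)
        | none => "not found" := by
  obtain ⟨hk, -, hhigh⟩ := vsBuild_spec rows 0 PySem.Dict.empty (by simp [PySem.Dict.keys_empty])
  have hkeys : (vsBuild rows 0 PySem.Dict.empty).keys
      = ((List.range rows.length).filter (fun i => !(vsCandS (rows.getD i "")).isEmpty)).map
        (fun i : Nat => (i : Int)) := by
    rw [hk, vsKeysFrom_eq rows 0, PySem.Dict.keys_empty, List.nil_append]
    exact List.map_congr_left (fun i _ => by simp)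
  have hnd : (vsBuild rows 0 PySem.Dict.empty).keys.Nodup := by
    rw [hkeys]
    have hp : ((List.range rows.length).filter
        (fun i => !(vsCandS (rows.getD i "")).isEmpty)).Pairwise (fun a b : Nat => (a : Int) < (b : Int)) :=
      (List.pairwise_lt_range.filter _).imp (fun h => by exact_mod_cast h)
    exact (List.pairwise_map.2 hp).imp ne_of_lt
  have hitems : (vsBuild rows 0 PySem.Dict.empty).items
      = ((List.range rows.length).filter (fun i => !(vsCandS (rows.getD i "")).isEmpty)).map
        (fun i : Nat => ((i : Int), vsCandS (rows.getD i ""))) := by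
    rw [PySem.Dict.items_eq_map_keys _ hnd PySem.Set.empty, hkeys, List.map_map]
    refine List.map_congr_left (fun i _ => ?_)
    simp only [Function.comp_apply]
    have h := hhigh i
    rw [zero_add] at h
    rw [h]
  show vsScanA (vsBuild rows 0 PySem.Dict.empty) (vsBuild rows 0 PySem.Dict.empty).items = _
  rw [hitems, vsScanA_spec rows, List.find?_filter]
  have hpred : (fun i : Nat => decide ((!(vsCandS (rows.getD i "")).isEmpty) = true
      ∧ (!(vsCommonAt rows i).isEmpty) = true)) = (fun i : Nat => !(vsCommonAt rows i).isEmpty) := by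
    funext i
    by_cases hg : (!(vsCommonAt rows i).isEmpty) = true
    · have hcand : (!(vsCandS (rows.getD i "")).isEmpty) = true := by
        cases hcm : vsCommonAt rows i with
        | nil => simp [hcm] at hg
        | cons a tl =>
          have ha : a ∈ vsCommonAt rows i := by rw [hcm]; exact List.mem_cons_self
          have hma := (PySem.Set.mem_inter _ _ a).1 ha
          cases hcs : vsCandS (rows.getD i "") with
          | nil => rw [show vsCommonAt rows i = PySem.Set.inter (vsCandS (rows.getD i ""))
              (vsCandS (rows.getD (i + 1) "")) from rfl, hcs] at ha; simp [PySem.Set.inter] at ha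
          | cons y ys => simp
      have hne' : vsCandS (rows.getD i "") ≠ [] := by
        intro h; rw [h] at hcand; simp at hcand
      simp [hg]
      exact hne' 
    · simp only [Bool.not_eq_true] at hg
      simp [hg]
  rw [hpred]

theorem vsGoB_eq (rows : List String) :
    ∀ r0 : Int, vsGoB (PySem.Set.ofList "aeiou".toList) r0 (rows.zip rows.tail)
      = match (List.range rows.length).find? (fun i => (vsGP rows i).isSome) with
        | some i => PySem.Int.toStr (r0 + (i : Int)) ++ "-" ++ PySem.Int.toStr (((vsGP rows i).getD 0 : Nat) : Int)
        | none => "not found" := by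
  induction rows with
  | nil => intro r0; rfl
  | cons x rest ih =>
    intro r0
    cases rest with
    | nil =>
      have h0 : vsGP [x] 0 = none := by simp [vsGP]
      have h1 : (List.range (1 : Nat)).find? (fun i => (vsGP [x] i).isSome) = none := by
        rw [List.range_one]
        simp [h0]
      show vsGoB (PySem.Set.ofList "aeiou".toList) r0 [] = _
      rw [show ([x] : List String).length = 1 from rfl, h1]
      rfl
    | cons y rest' =>
      have hzip : (x :: y :: rest').zip (x :: y :: rest').tail
          = (x, y) :: ((y :: rest').zip (y :: rest').tail) := rfl
      have hgps : ∀ i : Nat, vsGP (x :: y :: rest') (i + 1) = vsGP (y :: rest') i := fun i => rfl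
      have hgp0 : vsGP (x :: y :: rest') 0
          = (List.range (min x.toList.length y.toList.length - 1)).find?
            (fun c => vsPairOk (PySem.Set.ofList "aeiou".toList) x.toList y.toList c) := rfl
      rw [hzip]
      show (match (List.range (min x.toList.length y.toList.length - 1)).find?
          (fun c => vsPairOk (PySem.Set.ofList "aeiou".toList) x.toList y.toList c) with
        | some c => PySem.Int.toStr r0 ++ "-" ++ PySem.Int.toStr (c : Int)
        | none => vsGoB (PySem.Set.ofList "aeiou".toList) (r0 + 1) ((y :: rest').zip (y :: rest').tail)) = _
      rw [← hgp0]
      rw [show List.range (x :: y :: rest').length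
        = 0 :: (List.range (y :: rest').length).map Nat.succ from List.range_succ_eq_map]
      cases hf : vsGP (x :: y :: rest') 0 with
      | some c =>
        rw [List.find?_cons_of_pos (by simp [hf])]
        simp only [hf, Option.getD_some, Nat.cast_zero, add_zero]
      | none =>
        rw [List.find?_cons_of_neg (by simp [hf])]
        rw [ih (r0 + 1), List.find?_map]
        have hcomp : ((fun i => (vsGP (x :: y :: rest') i).isSome) ∘ Nat.succ)
            = fun i => (vsGP (y :: rest') i).isSome :=
          funext (fun i => by rw [Function.comp_apply, hgps])
        rw [hcomp]
        cases hfind : (List.range (y :: rest').length).find? (fun i => (vsGP (y :: rest') i).isSome) with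
        | none => rfl
        | some i =>
          simp only [Option.map_some]
          have harg : (r0 + 1) + (i : Int) = r0 + ((Nat.succ i : Nat) : Int) := by push_cast; ring
          rw [harg, hgps i]
  
theorem vsGood_agree (rows : List String) (i : Nat) :
    (!(vsCommonAt rows i).isEmpty) = (vsGP rows i).isSome := by
  rw [vsCommonAt_eq rows i]
  have hgp : vsGP rows i = (List.range (min (rows.getD i "").toList.length
      (rows.getD (i + 1) "").toList.length - 1)).find?
      (fun c => vsPairOk (PySem.Set.ofList "aeiou".toList) (rows.getD i "").toList (rows.getD (i + 1) "").toList c) := rfl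
  rw [hgp, ← List.head?_filter]
  cases h : (List.range (min (rows.getD i "").toList.length (rows.getD (i + 1) "").toList.length - 1)).filter
      (fun c => vsPairOk (PySem.Set.ofList "aeiou".toList) (rows.getD i "").toList (rows.getD (i + 1) "").toList c) with
  | nil => simp
  | cons a tl => simp

theorem vsMin_head (x : Int) (t : List Int) (h : (x :: t).Pairwise (· < ·)) :
    (PySem.List.min? (x :: t) (fun y => y)).getD 0 = x := by
  rw [PySem.List.min?_id_cons]
  rcases PySem.List.foldl_min_mem t x with he | he
  · simp [he]
  · have h1 := (PySem.List.foldl_min_le t x).1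
    have h2 := (List.pairwise_cons.1 h).1 _ he
    omega

-- ===== VERDICT (by name: the statement is the Claim_ definition above) =====
theorem VowelSquare_spec : Claim_equal_VowelSquare := by
  intro strArr _
  unfold Spec_VowelSquare
  rw [vsA_eq]
  have hB : VowelSquare_alt strArr
      = vsGoB (PySem.Set.ofList "aeiou".toList) 0 (strArr.zip strArr.tail) := by
    unfold VowelSquare_alt
    rw [PySem.List.slice_from_one]
  rw [hB, vsGoB_eq strArr 0]
  rw [show (fun i => !(vsCommonAt strArr i).isEmpty) = (fun i => (vsGP strArr i).isSome) from
    funext (vsGood_agree strArr)]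
  cases hfind : (List.range strArr.length).find? (fun i => (vsGP strArr i).isSome) with
  | none => rfl
  | some i =>
    have hgood : (vsGP strArr i).isSome = true := by
      have := List.find?_some hfind
      simpa using this
    have hflt := vsCommonAt_eq strArr i
    have hgp : vsGP strArr i = ((List.range (min (strArr.getD i "").toList.length
        (strArr.getD (i + 1) "").toList.length - 1)).filter
        (fun c => vsPairOk (PySem.Set.ofList "aeiou".toList) (strArr.getD i "").toList (strArr.getD (i + 1) "").toList c)).head? := by
      rw [List.head?_filter]
      rfl
    cases hfl : (List.range (min (strArr.getD i "").toList.length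
        (strArr.getD (i + 1) "").toList.length - 1)).filter
        (fun c => vsPairOk (PySem.Set.ofList "aeiou".toList) (strArr.getD i "").toList (strArr.getD (i + 1) "").toList c) with
    | nil =>
      rw [hfl] at hgp
      rw [hgp] at hgood
      simp at hgood
    | cons c tl =>
      have hgpc : vsGP strArr i = some c := by rw [hgp, hfl]; rfl
      have hcommon : vsCommonAt strArr i = (c : Int) :: tl.map (fun c : Nat => (c : Int)) := by
        rw [hflt, hfl, List.map_cons]
      have hmin : (PySem.List.min? (vsCommonAt strArr i) (fun x => x)).getD 0 = (c : Int) := by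
        rw [hcommon]
        exact vsMin_head _ _ (by rw [← hcommon]; exact vsCommonAt_pairwise strArr i)
      simp only [hmin, hgpc, Option.getD_some, zero_add]
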